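-- pv_equiv track=rewrite | github.com/pesuga/agent-nexus | backend/main.py | _infer_agent_profile_type
-- ===== SOURCE A (Python) =====
-- from typing import Any, Dict, List, Optional, Set
--
-- def _infer_agent_profile_type(capabilities: List[str], agent_name: str) -> str:
--     caps = {c.strip().lower() for c in capabilities if str(c).strip()}
--     if "coding" in caps or "architecture" in caps or "debugging" in caps or "system_design" in caps:
--         return "coder"
--     if "strategy" in caps or "planning" in caps or "analysis" in caps:
--         return "strategist"
--     if "creativity" in caps or "design" in caps or "innovation" in caps:
--         return "creative"
--     if "infrastructure" in caps or "maintenance" in caps or "automation" in caps: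
--         return "operator"
--     if "coordination" in caps or "project_management" in caps or "reporting" in caps:
--         return "coordinator"
--     fallback = agent_name.strip().lower()
--     if fallback == "kuro":
--         return "coder"
--     if fallback == "shin":
--         return "strategist"
--     if fallback == "sora":
--         return "creative"
--     if fallback == "ren":
--         return "operator"
--     if fallback == "aki":
--         return "coordinator"
--     return "generalist"
-- ===== SOURCE B (Python) =====
-- # Inverted index: map each keyword to (priority_rank, category); one pass over
-- # capabilities keeps the lowest-rank match; name fallback via a dict.
-- _KEYWORD_INFO = {
--     "coding": (0, "coder"), "architecture": (0, "coder"),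
--     "debugging": (0, "coder"), "system_design": (0, "coder"),
--     "strategy": (1, "strategist"), "planning": (1, "strategist"), "analysis": (1, "strategist"),
--     "creativity": (2, "creative"), "design": (2, "creative"), "innovation": (2, "creative"),
--     "infrastructure": (3, "operator"), "maintenance": (3, "operator"), "automation": (3, "operator"),
--     "coordination": (4, "coordinator"), "project_management": (4, "coordinator"), "reporting": (4, "coordinator"),
-- }
-- _NAME_MAP = {"kuro": "coder", "shin": "strategist", "sora": "creative",
--              "ren": "operator", "aki": "coordinator"}
--
-- def _infer_agent_profile_type(capabilities, agent_name):
--     best = None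
--     for cap in capabilities:
--         info = _KEYWORD_INFO.get(cap.strip().lower())
--         if info is not None and (best is None or info[0] < best[0]):
--             best = info
--     if best is not None:
--         return best[1]
--     return _NAME_MAP.get(agent_name.strip().lower(), "generalist")
-- ===== Notes on version B (the rewrite author's own statement) =====
-- stated objective: alternative
-- what changed: Replaces the set-build plus five grouped membership tests with an inverted keyword->(rank,category) index and a single pass over capabilities keeping the lowest-rank match; correct because the first priority group with any member present is exactly the minimum rank over all matched keywords.
import Mathlib
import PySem

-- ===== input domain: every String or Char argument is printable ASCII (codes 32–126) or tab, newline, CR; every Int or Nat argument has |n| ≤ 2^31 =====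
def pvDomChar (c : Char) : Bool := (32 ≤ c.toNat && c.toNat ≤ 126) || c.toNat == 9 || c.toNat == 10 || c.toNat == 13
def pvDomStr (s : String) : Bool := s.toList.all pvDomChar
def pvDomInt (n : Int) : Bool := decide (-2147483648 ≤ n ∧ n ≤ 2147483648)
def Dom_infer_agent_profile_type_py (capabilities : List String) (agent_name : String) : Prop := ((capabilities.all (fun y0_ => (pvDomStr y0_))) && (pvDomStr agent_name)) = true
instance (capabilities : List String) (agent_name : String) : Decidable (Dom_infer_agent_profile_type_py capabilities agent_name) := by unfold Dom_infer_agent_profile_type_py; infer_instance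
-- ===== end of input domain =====

-- B replaces A's set-build plus grouped membership tests by an inverted keyword->(rank,category)
-- index and a single min-rank pass over the capabilities (alternative decomposition; same cost).

-- ===== PORT A =====
def infer_agent_profile_type_py (capabilities : List String) (agent_name : String) : String :=
  let caps : PySem.Set String :=
    PySem.Set.ofList ((capabilities.filter (fun c => PySem.Str.strip c ≠ "")).map
      (fun c => PySem.Str.lower (PySem.Str.strip c)))
  if caps.contains "coding" || caps.contains "architecture" || caps.contains "debugging" || caps.contains "system_design" then "coder"
  else if caps.contains "strategy" || caps.contains "planning" || caps.contains "analysis" then "strategist"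
  else if caps.contains "creativity" || caps.contains "design" || caps.contains "innovation" then "creative"
  else if caps.contains "infrastructure" || caps.contains "maintenance" || caps.contains "automation" then "operator"
  else if caps.contains "coordination" || caps.contains "project_management" || caps.contains "reporting" then "coordinator"
  else
    let fallback := PySem.Str.lower (PySem.Str.strip agent_name)
    if fallback == "kuro" then "coder"
    else if fallback == "shin" then "strategist"
    else if fallback == "sora" then "creative"
    else if fallback == "ren" then "operator"
    else if fallback == "aki" then "coordinator"
    else "generalist"

-- ===== PORT B =====
def pvInfo : PySem.Dict String (Int × String) :=
  PySem.Dict.ofList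
    [("coding", (0, "coder")), ("architecture", (0, "coder")),
     ("debugging", (0, "coder")), ("system_design", (0, "coder")),
     ("strategy", (1, "strategist")), ("planning", (1, "strategist")), ("analysis", (1, "strategist")),
     ("creativity", (2, "creative")), ("design", (2, "creative")), ("innovation", (2, "creative")),
     ("infrastructure", (3, "operator")), ("maintenance", (3, "operator")), ("automation", (3, "operator")),
     ("coordination", (4, "coordinator")), ("project_management", (4, "coordinator")), ("reporting", (4, "coordinator"))]

def pvNameMap : PySem.Dict String String :=
  PySem.Dict.ofList [("kuro", "coder"), ("shin", "strategist"), ("sora", "creative"),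
   ("ren", "operator"), ("aki", "coordinator")]

def infer_agent_profile_type_py_alt (capabilities : List String) (agent_name : String) : String :=
  let best := capabilities.foldl (fun b cap =>
    match PySem.Dict.get? pvInfo (PySem.Str.lower (PySem.Str.strip cap)) with
    | some info =>
      match b with
      | none => some info
      | some bb => if info.1 < bb.1 then some info else some bb
    | none => b) none
  match best with
  | some bb => bb.2
  | none => (PySem.Dict.get? pvNameMap (PySem.Str.lower (PySem.Str.strip agent_name))).getD "generalist"

-- ===== PRECONDITION & SPEC =====
def Spec_infer_agent_profile_type_py (capabilities : List String) (agent_name : String) (out : String) : Prop := out = infer_agent_profile_type_py_alt capabilities agent_name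
instance (capabilities : List String) (agent_name : String) (out : String) : Decidable (Spec_infer_agent_profile_type_py capabilities agent_name out) := by unfold Spec_infer_agent_profile_type_py; infer_instance

-- ===== CLAIM (what is proved, stated in full; the proofs are below) =====
def Claim_equal_infer_agent_profile_type_py : Prop := ∀ (capabilities : List String) (agent_name : String), Dom_infer_agent_profile_type_py capabilities agent_name → Spec_infer_agent_profile_type_py capabilities agent_name (infer_agent_profile_type_py capabilities agent_name)

-- ===== LEMMAS AND PROOFS =====

-- rank lookup applied to the normalised capability (what B's loop computes per element)
def pvF (c : String) : Option (Int × String) :=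
  PySem.Dict.get? pvInfo (PySem.Str.lower (PySem.Str.strip c))

-- left-biased minimum-by-rank of two optional (rank, category) pairs
def pvMerge (a b : Option (Int × String)) : Option (Int × String) :=
  match a, b with
  | none, b => b
  | a, none => a
  | some x, some y => if y.1 < x.1 then some y else some x

def pvHit (caps : List String) (p : Int × String) : Bool := caps.any (fun c => pvF c == some p)

-- first-priority-group characterisation of the minimum-rank result
def pvChain (caps : List String) : Option (Int × String) :=
  if pvHit caps (0, "coder") then some (0, "coder")
  else if pvHit caps (1, "strategist") then some (1, "strategist")
  else if pvHit caps (2, "creative") then some (2, "creative")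
  else if pvHit caps (3, "operator") then some (3, "operator")
  else if pvHit caps (4, "coordinator") then some (4, "coordinator")
  else none

theorem pvInfo_eq : pvInfo = PySem.Dict.mk
    [("coding", (0, "coder")), ("architecture", (0, "coder")),
     ("debugging", (0, "coder")), ("system_design", (0, "coder")),
     ("strategy", (1, "strategist")), ("planning", (1, "strategist")), ("analysis", (1, "strategist")),
     ("creativity", (2, "creative")), ("design", (2, "creative")), ("innovation", (2, "creative")),
     ("infrastructure", (3, "operator")), ("maintenance", (3, "operator")), ("automation", (3, "operator")),
     ("coordination", (4, "coordinator")), ("project_management", (4, "coordinator")), ("reporting", (4, "coordinator"))] := by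
  rfl

theorem pv_get_pair (s : String) (v : Int × String) (h : PySem.Dict.get? pvInfo s = some v) :
    (s, v) ∈ [("coding", ((0 : Int), "coder")), ("architecture", (0, "coder")),
     ("debugging", (0, "coder")), ("system_design", (0, "coder")),
     ("strategy", (1, "strategist")), ("planning", (1, "strategist")), ("analysis", (1, "strategist")),
     ("creativity", (2, "creative")), ("design", (2, "creative")), ("innovation", (2, "creative")),
     ("infrastructure", (3, "operator")), ("maintenance", (3, "operator")), ("automation", (3, "operator")),
     ("coordination", (4, "coordinator")), ("project_management", (4, "coordinator")), ("reporting", (4, "coordinator"))] := by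
  rw [pvInfo_eq] at h
  exact PySem.Dict.mem_items_of_get?_eq_some _ h

theorem pv_f_cases (c : String) :
    pvF c = none ∨ pvF c = some (0, "coder") ∨ pvF c = some (1, "strategist") ∨
    pvF c = some (2, "creative") ∨ pvF c = some (3, "operator") ∨ pvF c = some (4, "coordinator") := by
  rcases h : pvF c with _ | v
  · exact Or.inl rfl
  · have hm := pv_get_pair _ _ h
    simp only [List.mem_cons, List.not_mem_nil, or_false, Prod.mk.injEq] at hm
    rcases hm with ⟨_, hv⟩|⟨_, hv⟩|⟨_, hv⟩|⟨_, hv⟩|⟨_, hv⟩|⟨_, hv⟩|⟨_, hv⟩|⟨_, hv⟩|⟨_, hv⟩|⟨_, hv⟩|⟨_, hv⟩|⟨_, hv⟩|⟨_, hv⟩|⟨_, hv⟩|⟨_, hv⟩|⟨_, hv⟩ <;>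
      simp_all

theorem pv_rank0 (s : String) : PySem.Dict.get? pvInfo s = some (0, "coder") ↔
    (s = "coding" ∨ s = "architecture" ∨ s = "debugging" ∨ s = "system_design") := by
  constructor
  · intro h
    have hm := pv_get_pair _ _ h
    simp only [List.mem_cons, List.not_mem_nil, or_false, Prod.mk.injEq] at hm
    simp_all
  · rintro (rfl | rfl | rfl | rfl) <;> rfl

theorem pv_rank1 (s : String) : PySem.Dict.get? pvInfo s = some (1, "strategist") ↔
    (s = "strategy" ∨ s = "planning" ∨ s = "analysis") := by
  constructor
  · intro h
    have hm := pv_get_pair _ _ h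
    simp only [List.mem_cons, List.not_mem_nil, or_false, Prod.mk.injEq] at hm
    simp_all
  · rintro (rfl | rfl | rfl) <;> rfl

theorem pv_rank2 (s : String) : PySem.Dict.get? pvInfo s = some (2, "creative") ↔
    (s = "creativity" ∨ s = "design" ∨ s = "innovation") := by
  constructor
  · intro h
    have hm := pv_get_pair _ _ h
    simp only [List.mem_cons, List.not_mem_nil, or_false, Prod.mk.injEq] at hm
    simp_all
  · rintro (rfl | rfl | rfl) <;> rfl

theorem pv_rank3 (s : String) : PySem.Dict.get? pvInfo s = some (3, "operator") ↔
    (s = "infrastructure" ∨ s = "maintenance" ∨ s = "automation") := by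
  constructor
  · intro h
    have hm := pv_get_pair _ _ h
    simp only [List.mem_cons, List.not_mem_nil, or_false, Prod.mk.injEq] at hm
    simp_all
  · rintro (rfl | rfl | rfl) <;> rfl

theorem pv_rank4 (s : String) : PySem.Dict.get? pvInfo s = some (4, "coordinator") ↔
    (s = "coordination" ∨ s = "project_management" ∨ s = "reporting") := by
  constructor
  · intro h
    have hm := pv_get_pair _ _ h
    simp only [List.mem_cons, List.not_mem_nil, or_false, Prod.mk.injEq] at hm
    simp_all
  · rintro (rfl | rfl | rfl) <;> rfl

theorem pv_set_contains_ofList (l : List String) (x : String) :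
    (PySem.Set.ofList l).contains x = l.contains x := by
  simp [PySem.Set.contains, List.contains_eq_mem, PySem.Set.mem_ofList]

-- membership of a non-empty keyword in A's normalised list ignores A's emptiness filter
theorem pv_mem_norm (caps : List String) (kw : String) (hkw : kw ≠ "") :
    ((caps.filter (fun c => PySem.Str.strip c ≠ "")).map
      (fun c => PySem.Str.lower (PySem.Str.strip c))).contains kw
      = caps.any (fun c => PySem.Str.lower (PySem.Str.strip c) == kw) := by
  rw [Bool.eq_iff_iff]
  simp only [List.contains_eq_mem, List.mem_map, List.mem_filter, List.any_eq_true,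
    beq_iff_eq, decide_eq_true_eq]
  constructor
  · rintro ⟨c, ⟨hc, -⟩, hn⟩; exact ⟨c, hc, hn⟩
  · rintro ⟨c, hc, hn⟩
    refine ⟨c, ⟨hc, fun h0 => hkw ?_⟩, hn⟩
    rw [← hn, h0]; rfl

theorem pv_group0 (caps : List String) :
    (((caps.filter (fun c => PySem.Str.strip c ≠ "")).map (fun c => PySem.Str.lower (PySem.Str.strip c))).contains "coding"
     || ((caps.filter (fun c => PySem.Str.strip c ≠ "")).map (fun c => PySem.Str.lower (PySem.Str.strip c))).contains "architecture"
     || ((caps.filter (fun c => PySem.Str.strip c ≠ "")).map (fun c => PySem.Str.lower (PySem.Str.strip c))).contains "debugging"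
     || ((caps.filter (fun c => PySem.Str.strip c ≠ "")).map (fun c => PySem.Str.lower (PySem.Str.strip c))).contains "system_design")
    = pvHit caps (0, "coder") := by
  rw [Bool.eq_iff_iff]
  simp only [Bool.or_eq_true, pv_mem_norm caps "coding" (by decide), pv_mem_norm caps "architecture" (by decide), pv_mem_norm caps "debugging" (by decide), pv_mem_norm caps "system_design" (by decide), pvHit, List.any_eq_true, beq_iff_eq, pvF]
  constructor
  · rintro (((⟨c, hc, hn⟩ | ⟨c, hc, hn⟩) | ⟨c, hc, hn⟩) | ⟨c, hc, hn⟩) <;>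
      exact ⟨c, hc, (pv_rank0 _).2 (by simp [hn])⟩
  · rintro ⟨c, hc, h⟩
    rcases (pv_rank0 _).1 h with hn | hn | hn | hn
    · exact (Or.inl (Or.inl (Or.inl ⟨c, hc, hn⟩)))
    · exact (Or.inl (Or.inl (Or.inr ⟨c, hc, hn⟩)))
    · exact (Or.inl (Or.inr ⟨c, hc, hn⟩))
    · exact (Or.inr ⟨c, hc, hn⟩)


theorem pv_group1 (caps : List String) :
    (((caps.filter (fun c => PySem.Str.strip c ≠ "")).map (fun c => PySem.Str.lower (PySem.Str.strip c))).contains "strategy"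
     || ((caps.filter (fun c => PySem.Str.strip c ≠ "")).map (fun c => PySem.Str.lower (PySem.Str.strip c))).contains "planning"
     || ((caps.filter (fun c => PySem.Str.strip c ≠ "")).map (fun c => PySem.Str.lower (PySem.Str.strip c))).contains "analysis")
    = pvHit caps (1, "strategist") := by
  rw [Bool.eq_iff_iff]
  simp only [Bool.or_eq_true, pv_mem_norm caps "strategy" (by decide), pv_mem_norm caps "planning" (by decide), pv_mem_norm caps "analysis" (by decide), pvHit, List.any_eq_true, beq_iff_eq, pvF]
  constructor
  · rintro ((⟨c, hc, hn⟩ | ⟨c, hc, hn⟩) | ⟨c, hc, hn⟩) <;>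
      exact ⟨c, hc, (pv_rank1 _).2 (by simp [hn])⟩
  · rintro ⟨c, hc, h⟩
    rcases (pv_rank1 _).1 h with hn | hn | hn
    · exact (Or.inl (Or.inl ⟨c, hc, hn⟩))
    · exact (Or.inl (Or.inr ⟨c, hc, hn⟩))
    · exact (Or.inr ⟨c, hc, hn⟩)


theorem pv_group2 (caps : List String) :
    (((caps.filter (fun c => PySem.Str.strip c ≠ "")).map (fun c => PySem.Str.lower (PySem.Str.strip c))).contains "creativity"
     || ((caps.filter (fun c => PySem.Str.strip c ≠ "")).map (fun c => PySem.Str.lower (PySem.Str.strip c))).contains "design"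
     || ((caps.filter (fun c => PySem.Str.strip c ≠ "")).map (fun c => PySem.Str.lower (PySem.Str.strip c))).contains "innovation")
    = pvHit caps (2, "creative") := by
  rw [Bool.eq_iff_iff]
  simp only [Bool.or_eq_true, pv_mem_norm caps "creativity" (by decide), pv_mem_norm caps "design" (by decide), pv_mem_norm caps "innovation" (by decide), pvHit, List.any_eq_true, beq_iff_eq, pvF]
  constructor
  · rintro ((⟨c, hc, hn⟩ | ⟨c, hc, hn⟩) | ⟨c, hc, hn⟩) <;>
      exact ⟨c, hc, (pv_rank2 _).2 (by simp [hn])⟩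
  · rintro ⟨c, hc, h⟩
    rcases (pv_rank2 _).1 h with hn | hn | hn
    · exact (Or.inl (Or.inl ⟨c, hc, hn⟩))
    · exact (Or.inl (Or.inr ⟨c, hc, hn⟩))
    · exact (Or.inr ⟨c, hc, hn⟩)


theorem pv_group3 (caps : List String) :
    (((caps.filter (fun c => PySem.Str.strip c ≠ "")).map (fun c => PySem.Str.lower (PySem.Str.strip c))).contains "infrastructure"
     || ((caps.filter (fun c => PySem.Str.strip c ≠ "")).map (fun c => PySem.Str.lower (PySem.Str.strip c))).contains "maintenance"
     || ((caps.filter (fun c => PySem.Str.strip c ≠ "")).map (fun c => PySem.Str.lower (PySem.Str.strip c))).contains "automation")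
    = pvHit caps (3, "operator") := by
  rw [Bool.eq_iff_iff]
  simp only [Bool.or_eq_true, pv_mem_norm caps "infrastructure" (by decide), pv_mem_norm caps "maintenance" (by decide), pv_mem_norm caps "automation" (by decide), pvHit, List.any_eq_true, beq_iff_eq, pvF]
  constructor
  · rintro ((⟨c, hc, hn⟩ | ⟨c, hc, hn⟩) | ⟨c, hc, hn⟩) <;>
      exact ⟨c, hc, (pv_rank3 _).2 (by simp [hn])⟩
  · rintro ⟨c, hc, h⟩
    rcases (pv_rank3 _).1 h with hn | hn | hn
    · exact (Or.inl (Or.inl ⟨c, hc, hn⟩))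
    · exact (Or.inl (Or.inr ⟨c, hc, hn⟩))
    · exact (Or.inr ⟨c, hc, hn⟩)


theorem pv_group4 (caps : List String) :
    (((caps.filter (fun c => PySem.Str.strip c ≠ "")).map (fun c => PySem.Str.lower (PySem.Str.strip c))).contains "coordination"
     || ((caps.filter (fun c => PySem.Str.strip c ≠ "")).map (fun c => PySem.Str.lower (PySem.Str.strip c))).contains "project_management"
     || ((caps.filter (fun c => PySem.Str.strip c ≠ "")).map (fun c => PySem.Str.lower (PySem.Str.strip c))).contains "reporting")
    = pvHit caps (4, "coordinator") := by
  rw [Bool.eq_iff_iff]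
  simp only [Bool.or_eq_true, pv_mem_norm caps "coordination" (by decide), pv_mem_norm caps "project_management" (by decide), pv_mem_norm caps "reporting" (by decide), pvHit, List.any_eq_true, beq_iff_eq, pvF]
  constructor
  · rintro ((⟨c, hc, hn⟩ | ⟨c, hc, hn⟩) | ⟨c, hc, hn⟩) <;>
      exact ⟨c, hc, (pv_rank4 _).2 (by simp [hn])⟩
  · rintro ⟨c, hc, h⟩
    rcases (pv_rank4 _).1 h with hn | hn | hn
    · exact (Or.inl (Or.inl ⟨c, hc, hn⟩))
    · exact (Or.inl (Or.inr ⟨c, hc, hn⟩))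
    · exact (Or.inr ⟨c, hc, hn⟩)

theorem pv_lam_eq :
    (fun (b : Option (Int × String)) (cap : String) =>
      match PySem.Dict.get? pvInfo (PySem.Str.lower (PySem.Str.strip cap)) with
      | some info =>
        match b with
        | none => some info
        | some bb => if info.1 < bb.1 then some info else some bb
      | none => b) = (fun b cap => pvMerge b (pvF cap)) := by
  funext b cap
  unfold pvMerge pvF
  cases PySem.Dict.get? pvInfo (PySem.Str.lower (PySem.Str.strip cap)) <;> cases b <;> rfl

theorem pv_merge_none (a : Option (Int × String)) : pvMerge a none = a := by
  cases a <;> rfl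

theorem pv_merge_assoc (a b c : Option (Int × String)) :
    pvMerge (pvMerge a b) c = pvMerge a (pvMerge b c) := by
  rcases a with _ | x <;> rcases b with _ | y <;> rcases c with _ | z <;>
    simp only [pvMerge] <;> split_ifs <;>
      first
        | rfl
        | omega
        | (simp only [pvMerge] <;> split_ifs <;> first | rfl | omega)

theorem pv_fold_merge (caps : List String) (acc : Option (Int × String)) :
    caps.foldl (fun b cap => pvMerge b (pvF cap)) acc
      = pvMerge acc (caps.foldl (fun b cap => pvMerge b (pvF cap)) none) := by
  induction caps generalizing acc with
  | nil => simp [pv_merge_none]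
  | cons c caps ih =>
    simp only [List.foldl_cons]
    rw [ih (pvMerge acc (pvF c)), ih (pvMerge none (pvF c))]
    have hnone : pvMerge none (pvF c) = pvF c := by cases pvF c <;> rfl
    rw [hnone, pv_merge_assoc]

theorem pv_hit_cons (c : String) (caps : List String) (p : Int × String) :
    pvHit (c :: caps) p = ((pvF c == some p) || pvHit caps p) := by
  simp [pvHit]

theorem pv_fold_chain (caps : List String) :
    caps.foldl (fun b cap => pvMerge b (pvF cap)) none = pvChain caps := by
  induction caps with
  | nil => rfl
  | cons c caps ih =>
    simp only [List.foldl_cons]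
    have hnone : pvMerge none (pvF c) = pvF c := by cases pvF c <;> rfl
    rw [pv_fold_merge, hnone, ih]
    rcases pv_f_cases c with h | h | h | h | h | h <;>
      rw [h] <;> simp only [pvChain, pv_hit_cons, h] <;> norm_num <;>
      split_ifs <;> simp [pvMerge]

theorem pvNameMap_eq : pvNameMap = PySem.Dict.mk
    [("kuro", "coder"), ("shin", "strategist"), ("sora", "creative"),
     ("ren", "operator"), ("aki", "coordinator")] := by
  rfl

theorem pv_fallback_none (fb : String) (h1 : fb ≠ "kuro") (h2 : fb ≠ "shin")
    (h3 : fb ≠ "sora") (h4 : fb ≠ "ren") (h5 : fb ≠ "aki") :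
    (PySem.Dict.get? pvNameMap fb).getD "generalist" = "generalist" := by
  rw [pvNameMap_eq]
  have hemp : (PySem.Dict.mk ([] : List (String × String))).get? fb = none := rfl
  simp only [PySem.Dict.get?_mk_cons, beq_iff_eq, if_neg (Ne.symm h1), if_neg (Ne.symm h2),
    if_neg (Ne.symm h3), if_neg (Ne.symm h4), if_neg (Ne.symm h5), hemp, Option.getD_none]

-- ===== VERDICT (by name: the statement is the Claim_ definition above) =====
set_option maxHeartbeats 1000000 in
theorem infer_agent_profile_type_py_spec : Claim_equal_infer_agent_profile_type_py := by
  intro caps name _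
  unfold Spec_infer_agent_profile_type_py infer_agent_profile_type_py infer_agent_profile_type_py_alt
  rw [pv_lam_eq]
  simp only [pv_set_contains_ofList, pv_fold_chain, pv_group0, pv_group1, pv_group2,
    pv_group3, pv_group4]
  unfold pvChain
  split_ifs with h0 h1 h2 h3 h4 hk1 hk2 hk3 hk4 hk5
  · rfl
  · rfl
  · rfl
  · rfl
  · rfl
  · rw [beq_iff_eq] at hk1; rw [hk1]; rfl
  · rw [beq_iff_eq] at hk2; rw [hk2]; rfl
  · rw [beq_iff_eq] at hk3; rw [hk3]; rfl
  · rw [beq_iff_eq] at hk4; rw [hk4]; rfl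
  · rw [beq_iff_eq] at hk5; rw [hk5]; rfl
  · exact (pv_fallback_none _ (by simpa using hk1) (by simpa using hk2) (by simpa using hk3)
      (by simpa using hk4) (by simpa using hk5)).symm
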